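-- pv_equiv track=rewrite | github.com/johwiebe/stn | stn/deg.py | get_short_mc
-- ===== SOURCE A (Python) =====
-- def get_short_mc(mc, t):
--     slast = mc[0]
--     mcshort = [mc[0]]
--     tshort = []
--     for i, s in enumerate(mc):
--         if s != slast:
--             mcshort.append(s)
--             tshort.append(t[i-1])
--         slast = s
--     tshort.append(t[-1])
--     return mcshort, tshort
-- ===== SOURCE B (Python) =====
-- def get_short_mc(mc, t):
--     # Run-length partition: outer loop jumps run to run, inner scan finds run end.
--     mcshort = []
--     ends = []  # index one past each run
--     i, n = 0, len(mc)
--     while i < n: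
--         j = i + 1
--         while j < n and mc[j] == mc[i]:
--             j += 1
--         mcshort.append(mc[i])
--         ends.append(j)
--         i = j
--     tshort = [t[e - 1] for e in ends[:-1]] + [t[-1]]
--     return mcshort, tshort
-- ===== Notes on version B (the rewrite author's own statement) =====
-- stated objective: alternative
-- what changed: B run-length-partitions mc with a two-level scan that jumps from run to run recording run-end indices, then builds tshort in a second pass by indexing t at each run end, instead of A's single stateful element-by-element loop testing every adjacent pair and emitting times inline.
import Mathlib
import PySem

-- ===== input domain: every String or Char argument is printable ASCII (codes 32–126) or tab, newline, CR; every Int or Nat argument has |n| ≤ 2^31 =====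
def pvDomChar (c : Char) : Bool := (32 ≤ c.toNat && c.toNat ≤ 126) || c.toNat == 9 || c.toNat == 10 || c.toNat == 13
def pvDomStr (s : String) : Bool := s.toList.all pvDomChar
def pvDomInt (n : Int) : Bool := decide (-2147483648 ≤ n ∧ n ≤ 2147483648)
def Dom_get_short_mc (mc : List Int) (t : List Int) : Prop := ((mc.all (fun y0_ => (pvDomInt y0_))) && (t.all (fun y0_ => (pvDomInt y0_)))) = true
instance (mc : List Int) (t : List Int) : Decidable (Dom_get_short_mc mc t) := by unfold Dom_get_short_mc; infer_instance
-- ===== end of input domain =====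

-- B replaces A's stateful element-by-element transition loop by a run-length partition:
-- an outer scan jumping run to run recording run-end indices, then a second pass indexing
-- t at each run end (objective: alternative algorithm, same O(n) cost).

-- ===== PORT A =====
def get_short_mc (mc : List Int) (t : List Int) : List Int × List Int :=
  let slast0 := PySem.List.pyGetD mc 0 0
  let st := (PySem.List.enumerate mc).foldl
    (fun (acc : Int × List Int × List Int) p =>
      if p.2 ≠ acc.1 then (p.2, acc.2.1 ++ [p.2], acc.2.2 ++ [PySem.List.pyGetD t (p.1 - 1) 0])
      else (p.2, acc.2.1, acc.2.2))
    (slast0, [slast0], [])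
  (st.2.1, st.2.2 ++ [PySem.List.pyGetD t (-1) 0])

-- ===== PORT B =====
-- inner while loop of B: advance k while k < len(xs) and xs[k] == xs[0]
-- (xs is the current tail mc[i:], so xs[0] = mc[i], xs[k] = mc[i+k]; in-range getD is exact)
def bInner (xs : List Int) (k : Nat) : Nat :=
  if h : k < xs.length ∧ xs.getD k 0 = xs.getD 0 0 then bInner xs (k + 1) else k
termination_by xs.length - k
decreasing_by omega

-- cited by bOuter's termination proof
theorem bInner_ge (xs : List Int) (k : Nat) : k ≤ bInner xs k := by
  fun_induction bInner with
  | case1 k h ih => omega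
  | case2 k h => omega

-- outer while loop of B: the current position i is represented by the remaining tail mc[i:]
-- (done = i); each step records the run's state and run-end index, then jumps to the run end
def bOuter : List Int → Nat → List Int × List Nat
  | [], _ => ([], [])
  | x :: ys, done =>
    let k := bInner (x :: ys) 1
    let r := bOuter ((x :: ys).drop k) (done + k)
    (x :: r.1, (done + k) :: r.2)
termination_by xs => xs.length
decreasing_by
  have h1 := bInner_ge (x :: ys) 1
  simp only [List.length_drop, List.length_cons]
  omega

def get_short_mc_alt (mc : List Int) (t : List Int) : List Int × List Int :=
  let st := bOuter mc 0
  -- ends[:-1] is List.dropLast (exact for this slice); t[e-1] via pyGetD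
  (st.1, (st.2.dropLast).map (fun e => PySem.List.pyGetD t ((e : Int) - 1) 0)
           ++ [PySem.List.pyGetD t (-1) 0])

-- ===== PRECONDITION & SPEC =====
-- Pre_ is exactly where A returns: mc and t nonempty (else mc[0] / t[-1] raise IndexError)
-- and every transition index i (mc[i] ≠ mc[i-1]) satisfies i ≤ len t (else t[i-1] raises IndexError).
def Pre_get_short_mc (mc : List Int) (t : List Int) : Prop :=
  mc ≠ [] ∧ t ≠ [] ∧
    ∀ i ∈ List.range mc.length, 1 ≤ i → mc.getD i 0 ≠ mc.getD (i - 1) 0 → i ≤ t.length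
instance (mc : List Int) (t : List Int) : Decidable (Pre_get_short_mc mc t) := by
  unfold Pre_get_short_mc; infer_instance
def pvWitness_get_short_mc : List Int × List Int := ([1, 1, 2], [3, 4, 5])

def Spec_get_short_mc (mc : List Int) (t : List Int) (out : List Int × List Int) : Prop := out = get_short_mc_alt mc t
instance (mc : List Int) (t : List Int) (out : List Int × List Int) : Decidable (Spec_get_short_mc mc t out) := by unfold Spec_get_short_mc; infer_instance

-- ===== CLAIM (what is proved, stated in full; the proofs are below) =====
def Claim_equal_get_short_mc : Prop := ∀ (mc : List Int) (t : List Int), Dom_get_short_mc mc t → Pre_get_short_mc mc t → Spec_get_short_mc mc t (get_short_mc mc t)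

-- ===== LEMMAS AND PROOFS =====

-- common reference: states after a break and absolute break positions
def brk (s : Int) (k : Nat) : List Int → List Int × List Nat
  | [] => ([], [])
  | x :: xs =>
    let r := brk x (k + 1) xs
    if x ≠ s then (x :: r.1, k :: r.2) else r

-- length of the equal-to-h prefix
def pl (h : Int) : List Int → Nat
  | [] => 0
  | x :: xs => if x = h then pl h xs + 1 else 0

theorem pl_le (h : Int) (l : List Int) : pl h l ≤ l.length := by
  induction l with
  | nil => simp [pl]
  | cons x xs ih => simp only [pl, List.length_cons]; split <;> omega

theorem pl_drop_head (h : Int) (l : List Int) (y : Int) (zs : List Int)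
    (hd : l.drop (pl h l) = y :: zs) : y ≠ h := by
  induction l with
  | nil => simp [pl] at hd
  | cons x xs ih =>
    by_cases hx : x = h
    · simp only [pl, hx] at hd
      exact ih hd
    · simp only [pl, if_neg hx, List.drop_zero] at hd
      rw [List.cons.injEq] at hd
      rw [hd.1] at hx
      exact hx

theorem bInner_eq (xs : List Int) (k : Nat) :
    bInner xs k = k + pl (xs.getD 0 0) (xs.drop k) := by
  fun_induction bInner with
  | case1 k h ih =>
    obtain ⟨hk, he⟩ := h
    have hd : xs.drop k = xs[k] :: xs.drop (k + 1) := List.drop_eq_getElem_cons hk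
    have hx : xs[k] = xs.getD 0 0 := by
      rwa [List.getD_eq_getElem xs 0 hk] at he
    rw [ih, hd]
    simp only [pl]
    rw [if_pos hx]
    omega
  | case2 k h =>
    by_cases hk : k < xs.length
    · have he : ¬ xs.getD k 0 = xs.getD 0 0 := fun hc => h ⟨hk, hc⟩
      have hd : xs.drop k = xs[k] :: xs.drop (k + 1) := List.drop_eq_getElem_cons hk
      have hx : ¬ xs[k] = xs.getD 0 0 := by
        rwa [List.getD_eq_getElem xs 0 hk] at he
      rw [hd]
      simp only [pl]
      rw [if_neg hx]
      omega
    · rw [List.drop_eq_nil_of_le (by omega)]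
      simp [pl]

theorem brk_run (l : List Int) : ∀ (h : Int) (k : Nat),
    brk h k l = brk h (k + pl h l) (l.drop (pl h l)) := by
  induction l with
  | nil => intro h k; simp [pl]
  | cons x xs ih =>
    intro h k
    by_cases hx : x = h
    · subst hx
      have hpl : pl x (x :: xs) = pl x xs + 1 := by simp [pl]
      rw [hpl, List.drop_succ_cons]
      have h1 : brk x k (x :: xs) = brk x (k + 1) xs := by simp [brk]
      rw [h1, ih x (k + 1)]
      have e : k + (pl x xs + 1) = k + 1 + pl x xs := by omega
      rw [e]
    · simp [pl, hx]

theorem bOuter_eq (xs : List Int) (done : Nat) :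
    bOuter xs done = (match xs with
      | [] => (([], []) : List Int × List Nat)
      | x :: ys => (x :: (brk x (done + 1) ys).1,
                    (brk x (done + 1) ys).2 ++ [done + xs.length])) := by
  fun_induction bOuter xs done with
  | case1 d => rfl
  | case2 x ys done k r ih =>
    have hk : k = bInner (x :: ys) 1 := rfl
    have hr : r = bOuter ((x :: ys).drop k) (done + k) := rfl
    clear_value r k
    subst hr
    have hkp : k = 1 + pl x ys := by rw [hk, bInner_eq]; simp
    have hple : pl x ys ≤ ys.length := pl_le x ys
    have hdropeq : (x :: ys).drop k = ys.drop (pl x ys) := by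
      rw [hkp, Nat.add_comm, List.drop_succ_cons]
    rw [hdropeq] at ih
    show (x :: (bOuter ((x :: ys).drop k) (done + k)).1,
          (done + k) :: (bOuter ((x :: ys).drop k) (done + k)).2) = _
    rw [hdropeq]
    cases hd : ys.drop (pl x ys) with
    | nil =>
      have hlen : pl x ys = ys.length := by
        have h2 := congrArg List.length hd
        simp at h2
        omega
      rw [hd] at ih
      rw [ih]
      dsimp only
      have hbrk : brk x (done + 1) ys = ([], []) := by
        rw [brk_run, hd]
        rfl
      rw [hbrk]
      simp only [List.length_cons, List.nil_append]
      refine Prod.ext rfl ?_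
      simp only
      have : done + k = done + (ys.length + 1) := by omega
      rw [this]
    | cons y zs =>
      have hy : y ≠ x := pl_drop_head x ys y zs hd
      have hlen : zs.length + 1 = ys.length - pl x ys := by
        have h2 := congrArg List.length hd
        simp at h2
        omega
      rw [hd] at ih
      rw [ih]
      dsimp only
      have hbrk : brk x (done + 1) ys
          = (y :: (brk y (done + 1 + pl x ys + 1) zs).1,
             (done + 1 + pl x ys) :: (brk y (done + 1 + pl x ys + 1) zs).2) := by
        rw [brk_run, hd]
        simp [brk, hy]
      rw [hbrk]
      simp only [List.length_cons, List.cons_append]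
      refine Prod.ext ?_ ?_
      · simp only
        have e1 : done + k + 1 = done + 1 + pl x ys + 1 := by omega
        rw [e1]
      · simp only
        have e1 : done + k = done + 1 + pl x ys := by omega
        rw [e1]
        have e3 : done + 1 + pl x ys + (zs.length + 1) = done + (ys.length + 1) := by omega
        rw [e3]

-- A's loop step
def stepA (t : List Int) (acc : Int × List Int × List Int) (p : Int × Int) : Int × List Int × List Int :=
  if p.2 ≠ acc.1 then (p.2, acc.2.1 ++ [p.2], acc.2.2 ++ [PySem.List.pyGetD t (p.1 - 1) 0])
  else (p.2, acc.2.1, acc.2.2)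

theorem foldA (t : List Int) :
    ∀ (l : List Int) (s : Int) (k : Nat) (ms ts : List Int),
      (PySem.List.enumerate l (k : Int)).foldl (stepA t) (s, ms, ts)
      = (l.foldl (fun _ x => x) s,
         ms ++ (brk s k l).1,
         ts ++ (brk s k l).2.map (fun i => PySem.List.pyGetD t ((i : Int) - 1) 0)) := by
  intro l
  induction l with
  | nil => intro s k ms ts; simp [PySem.List.enumerate_nil, brk]
  | cons x xs ih =>
    intro s k ms ts
    rw [PySem.List.enumerate_cons, List.foldl_cons]
    have hstep : stepA t (s, ms, ts) ((k : Int), x)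
        = if x ≠ s then (x, ms ++ [x], ts ++ [PySem.List.pyGetD t ((k : Int) - 1) 0]) else (x, ms, ts) := rfl
    rw [hstep]
    have hcast : (k : Int) + 1 = ((k + 1 : Nat) : Int) := by push_cast; ring
    by_cases h : x ≠ s
    · rw [if_pos h, hcast, ih]
      simp [brk, h]
    · rw [if_neg h, hcast, ih]
      simp [brk, h]

-- ===== VERDICT (by name: the statement is the Claim_ definition above) =====
theorem get_short_mc_spec : Claim_equal_get_short_mc := by
  intro mc t _ hpre
  obtain ⟨hmc, _, _⟩ := hpre
  obtain ⟨m0, rest, rfl⟩ : ∃ m0 rest, mc = m0 :: rest := by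
    cases mc with
    | nil => exact absurd rfl hmc
    | cons a l => exact ⟨a, l, rfl⟩
  unfold Spec_get_short_mc get_short_mc get_short_mc_alt
  simp only []
  have hfun : (fun (acc : Int × List Int × List Int) (p : Int × Int) =>
      if p.2 ≠ acc.1 then (p.2, acc.2.1 ++ [p.2], acc.2.2 ++ [PySem.List.pyGetD t (p.1 - 1) 0])
      else (p.2, acc.2.1, acc.2.2)) = stepA t := rfl
  rw [hfun, PySem.List.pyGetD_zero_cons, PySem.List.enumerate_cons, List.foldl_cons]
  have h0 : stepA t (m0, [m0], []) ((0 : Int), m0) = (m0, [m0], []) := by simp [stepA]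
  rw [h0]
  have e1 : (0 : Int) + 1 = ((1 : Nat) : Int) := by norm_num
  rw [e1, foldA t rest m0 1 [m0] []]
  rw [bOuter_eq]
  simp only [List.nil_append, List.length_cons, Nat.zero_add]
  rw [List.dropLast_concat]
  simp
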